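-- pv_equiv track=rewrite | github.com/gf234/python_problem_solving | 프로그래머스/2개 이하로 다른 비트.py | solution
-- ===== SOURCE A (Python) =====
-- def solution(numbers):
--     answer = []
--     for number in numbers:
--         bit = 1
--         while True:
--             if bit & number == 0:
--                 if bit == 1:
--                     answer.append(number | bit)
--                 else:
--                     answer.append((number | bit) ^ (bit >> 1))
--                 break
--             bit <<= 1
--
--     return answer
-- ===== SOURCE B (Python) =====
-- def flip(n):
--     # recurse on halves: even -> set bit 0; odd -> solve on n//2, re-attach bit 0
--     if n % 2 == 0:
--         return n + 1
--     m = n // 2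
--     return 2 * flip(m) + m % 2
--
-- def solution(numbers):
--     return [flip(n) for n in numbers]
-- ===== Notes on version B (the rewrite author's own statement) =====
-- stated objective: simpler
-- what changed: Replaces the per-number bit-mask scanning while-loop with a short arithmetic recursion on n//2 (even: n+1; odd: 2*flip(n//2) + (n//2)%2), built with a list comprehension.
-- outside the precondition, e.g. on solution([-1]): A does not finish within the time limit, B raises RecursionError
import Mathlib
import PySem

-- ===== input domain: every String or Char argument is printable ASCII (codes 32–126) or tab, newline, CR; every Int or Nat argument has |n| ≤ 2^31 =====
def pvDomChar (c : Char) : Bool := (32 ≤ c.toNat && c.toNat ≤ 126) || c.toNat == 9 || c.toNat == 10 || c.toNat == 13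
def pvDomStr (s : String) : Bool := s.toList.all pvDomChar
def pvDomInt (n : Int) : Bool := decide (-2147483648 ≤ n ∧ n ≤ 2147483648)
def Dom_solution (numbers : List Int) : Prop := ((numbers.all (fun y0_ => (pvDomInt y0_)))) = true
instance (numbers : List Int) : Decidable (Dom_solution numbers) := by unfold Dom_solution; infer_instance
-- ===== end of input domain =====

-- B replaces A's bit-mask scanning while-loop by an arithmetic recursion on n // 2 (objective: simpler).

-- ===== PORT A =====
-- A's inner `while True` scan; the Nat fuel only makes the recursion total: on the
-- admitted inputs (0 ≤ n ≤ 2^31) the loop exits within 34 iterations, so fuel 64 is never exhausted.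
def solutionLoop (number : Int) (bit : Int) : Nat → Int
  | 0 => 0
  | f+1 =>
    if PySem.Int.band bit number = 0 then
      if bit = 1 then PySem.Int.bor number bit
      else PySem.Int.bxor (PySem.Int.bor number bit) (bit >>> (1:Nat))
    else solutionLoop number (bit <<< (1:Nat)) f

def solution (numbers : List Int) : List Int :=
  numbers.foldl (fun answer number => answer ++ [solutionLoop number 1 64]) []

-- ===== PORT B =====
-- B's recursion on n // 2; again the fuel is only a totality guard, never exhausted on admitted inputs.
def flipAlt (n : Int) : Nat → Int
  | 0 => 0
  | f+1 =>
    if PySem.Int.mod n 2 = 0 then n + 1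
    else 2 * flipAlt (PySem.Int.floordiv n 2) f + PySem.Int.mod (PySem.Int.floordiv n 2) 2

def solution_alt (numbers : List Int) : List Int :=
  numbers.map (fun n => flipAlt n 64)

-- ===== PRECONDITION & SPEC =====
-- Pre_ excludes lists containing -1, the one int all of whose bits are set: there A's `while`
-- loop never terminates (and B's recursion does not return either); A returns on every other list.
def Pre_solution (numbers : List Int) : Prop := ∀ n ∈ numbers, n ≠ -1
instance (numbers : List Int) : Decidable (Pre_solution numbers) := by unfold Pre_solution; infer_instance

def pvWitness_solution : List Int := [0, 1, 2, 5, 11, 12, 2147483647, -2, -5, -96, -2147483648]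

def Spec_solution (numbers : List Int) (out : List Int) : Prop := out = solution_alt numbers
instance (numbers : List Int) (out : List Int) : Decidable (Spec_solution numbers out) := by unfold Spec_solution; infer_instance

-- ===== CLAIM (what is proved, stated in full; the proofs are below) =====
def Claim_equal_solution : Prop := ∀ (numbers : List Int), Dom_solution numbers → Pre_solution numbers → Spec_solution numbers (solution numbers)

-- ===== LEMMAS AND PROOFS =====

-- one-step unfolding lemmas for the two recursions
theorem stepA_exit1 (n bit : Int) (fl : Nat) (h : PySem.Int.band bit n = 0) (hb : bit = 1) :
    solutionLoop n bit (fl+1) = PySem.Int.bor n bit := by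
  simp only [solutionLoop]
  rw [if_pos h, if_pos hb]

theorem stepA_exit (n bit : Int) (fl : Nat) (h : PySem.Int.band bit n = 0) (hb : ¬ bit = 1) :
    solutionLoop n bit (fl+1) = PySem.Int.bxor (PySem.Int.bor n bit) (bit >>> (1:Nat)) := by
  simp only [solutionLoop]
  rw [if_pos h, if_neg hb]

theorem stepA_rec (n bit : Int) (fl : Nat) (h : ¬ PySem.Int.band bit n = 0) :
    solutionLoop n bit (fl+1) = solutionLoop n (bit <<< (1:Nat)) fl := by
  simp only [solutionLoop]
  rw [if_neg h]

theorem flip_even (n : Int) (fl : Nat) (h : PySem.Int.mod n 2 = 0) : flipAlt n (fl+1) = n + 1 := by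
  simp only [flipAlt]
  rw [if_pos h]

theorem flip_odd (n : Int) (fl : Nat) (h : ¬ PySem.Int.mod n 2 = 0) :
    flipAlt n (fl+1)
      = 2 * flipAlt (PySem.Int.floordiv n 2) fl + PySem.Int.mod (PySem.Int.floordiv n 2) 2 := by
  simp only [flipAlt]
  rw [if_neg h]

-- bit-level homogeneity: the three bitwise ops act digit-by-digit on 2*a + r
theorem land_homog (a b r s : Nat) (hr : r < 2) (hs : s < 2) :
    (2*a+r) &&& (2*b+s) = 2*(a &&& b) + (r &&& s) := by
  have hrs : r &&& s < 2 := lt_of_le_of_lt (Nat.and_le_right) hs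
  apply Nat.eq_of_testBit_eq
  intro i
  cases i with
  | zero =>
      rw [Nat.testBit_and, Nat.testBit_zero, Nat.testBit_zero, Nat.testBit_zero]
      interval_cases r <;> interval_cases s <;> simp
  | succ i =>
      have h1 : (2*a+r)/2 = a := by omega
      have h2 : (2*b+s)/2 = b := by omega
      have h3 : (2*(a &&& b)+(r &&& s))/2 = a &&& b := by omega
      rw [Nat.testBit_and, Nat.testBit_add_one, Nat.testBit_add_one, Nat.testBit_add_one,
        h1, h2, h3, Nat.testBit_and]

theorem lor_homog (a b r s : Nat) (hr : r < 2) (hs : s < 2) :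
    (2*a+r) ||| (2*b+s) = 2*(a ||| b) + (r ||| s) := by
  have hrs : r ||| s < 2 := by interval_cases r <;> interval_cases s <;> decide
  apply Nat.eq_of_testBit_eq
  intro i
  cases i with
  | zero =>
      rw [Nat.testBit_or, Nat.testBit_zero, Nat.testBit_zero, Nat.testBit_zero]
      interval_cases r <;> interval_cases s <;> simp
  | succ i =>
      have h1 : (2*a+r)/2 = a := by omega
      have h2 : (2*b+s)/2 = b := by omega
      have h3 : (2*(a ||| b)+(r ||| s))/2 = a ||| b := by omega
      rw [Nat.testBit_or, Nat.testBit_add_one, Nat.testBit_add_one, Nat.testBit_add_one,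
        h1, h2, h3, Nat.testBit_or]

theorem lxor_homog (a b r s : Nat) (hr : r < 2) (hs : s < 2) :
    (2*a+r) ^^^ (2*b+s) = 2*(a ^^^ b) + (r ^^^ s) := by
  have hrs : r ^^^ s < 2 := by interval_cases r <;> interval_cases s <;> decide
  apply Nat.eq_of_testBit_eq
  intro i
  cases i with
  | zero =>
      rw [Nat.testBit_xor, Nat.testBit_zero, Nat.testBit_zero, Nat.testBit_zero]
      interval_cases r <;> interval_cases s <;> simp
  | succ i =>
      have h1 : (2*a+r)/2 = a := by omega
      have h2 : (2*b+s)/2 = b := by omega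
      have h3 : (2*(a ^^^ b)+(r ^^^ s))/2 = a ^^^ b := by omega
      rw [Nat.testBit_xor, Nat.testBit_add_one, Nat.testBit_add_one, Nat.testBit_add_one,
        h1, h2, h3, Nat.testBit_xor]

theorem pow_land_zero (k m : Nat) (h : m < 2^k) : (2^k) &&& m = 0 := by
  apply Nat.eq_of_testBit_eq
  intro i
  rw [Nat.testBit_and, Nat.testBit_two_pow]
  by_cases hik : k = i
  · subst hik; rw [Nat.testBit_lt_two_pow h]; simp
  · simp [hik]

theorem one_land_mod (m : Nat) : 1 &&& m = m % 2 := by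
  rw [Nat.land_comm]; exact Nat.and_one_is_mod m

-- cast helpers for the Int-level ports
theorem shl1_cast (a : Nat) : ((a:Int)) <<< (1:Nat) = ((2*a : Nat):Int) := by
  simp [Int.shiftLeft_eq]; ring

theorem shr1_cast (a : Nat) : ((a:Int)) >>> (1:Nat) = ((a >>> 1 : Nat):Int) := rfl

-- both scans exit their current step when bit 2^k of m is clear
theorem loop_exit (k m fl : Nat) (h : 2^k &&& m = 0) :
    solutionLoop ((2*m+1:Nat):Int) ((2^(k+1):Nat):Int) (fl+1)
      = 2 * solutionLoop ((m:Nat):Int) ((2^k:Nat):Int) (fl+1)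
        + (if k = 0 ∧ m % 2 = 0 then 0 else 1) := by
  have e1 : (2^(k+1)) &&& (2*m+1) = 2*(2^k &&& m) + (0 &&& 1) := by
    have e : 2^(k+1) = 2*2^k + 0 := by rw [Nat.pow_succ]; ring
    rw [e]; exact land_homog _ _ _ _ (by omega) (by omega)
  have e1' : (2^(k+1)) &&& (2*m+1) = 0 := by simpa [h] using e1
  have hband1 : PySem.Int.band ((2^(k+1):Nat):Int) ((2*m+1:Nat):Int) = 0 := by
    rw [PySem.Int.band_natCast]; exact_mod_cast e1'
  have hband2 : PySem.Int.band ((2^k:Nat):Int) ((m:Nat):Int) = 0 := by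
    rw [PySem.Int.band_natCast]; exact_mod_cast h
  cases k with
  | zero =>
      have hm : m % 2 = 0 := by
        have h' : 1 &&& m = 0 := by simpa using h
        have := one_land_mod m; omega
      rw [stepA_exit _ _ _ hband1 (by norm_num)]
      rw [stepA_exit1 _ _ _ hband2 (by norm_num)]
      rw [if_pos ⟨rfl, hm⟩]
      have hs : ((2:Nat)^(0+1)) >>> 1 = 1 := by decide
      have elor : (2*m+1) ||| 2^(0+1) = 2*(m ||| 1) + 1 := by
        have h0 : (2*m+1) ||| (2*1+0) = 2*(m ||| 1) + (1 ||| 0) :=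
          lor_homog _ _ _ _ (by omega) (by omega)
        have e : (2:Nat)^(0+1) = 2*1+0 := by norm_num
        rw [e]; simpa using h0
      have exor : (2*(m ||| 1) + 1) ^^^ 1 = 2*(m ||| 1) := by
        have h0 : (2*(m ||| 1)+1) ^^^ (2*0+1) = 2*((m ||| 1) ^^^ 0) + (1 ^^^ 1) :=
          lxor_homog _ _ _ _ (by omega) (by omega)
        simpa using h0
      have hor0 : m ||| 2^0 = m ||| 1 := by norm_num
      rw [PySem.Int.bor_natCast, PySem.Int.bor_natCast, shr1_cast, hs,
        PySem.Int.bxor_natCast, elor, exor, hor0]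
      push_cast; ring
  | succ j =>
      have hj : 0 < 2^j := Nat.two_pow_pos j
      have hjj : 2^(j+1) = 2^j * 2 := Nat.pow_succ ..
      have hjjj : 2^(j+1+1) = 2^(j+1) * 2 := Nat.pow_succ ..
      have hb1 : ((2^(j+1+1):Nat):Int) ≠ 1 := by
        have : (2:Nat)^(j+1+1) ≠ 1 := by omega
        exact_mod_cast this
      have hb2 : ((2^(j+1):Nat):Int) ≠ 1 := by
        have : (2:Nat)^(j+1) ≠ 1 := by omega
        exact_mod_cast this
      rw [stepA_exit _ _ _ hband1 hb1]
      rw [stepA_exit _ _ _ hband2 hb2]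
      rw [if_neg (by omega)]
      have hs1 : (2^(j+1+1)) >>> 1 = 2^(j+1) := by
        rw [Nat.shiftRight_succ, Nat.shiftRight_zero]; omega
      have hs2 : (2^(j+1)) >>> 1 = 2^j := by
        rw [Nat.shiftRight_succ, Nat.shiftRight_zero]; omega
      have elor : (2*m+1) ||| 2^(j+1+1) = 2*(m ||| 2^(j+1)) + 1 := by
        have h0 : (2*m+1) ||| (2*(2^(j+1))+0) = 2*(m ||| 2^(j+1)) + (1 ||| 0) :=
          lor_homog _ _ _ _ (by omega) (by omega)
        have e : (2:Nat)^(j+1+1) = 2*(2^(j+1))+0 := by omega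
        rw [e]; simpa using h0
      have exor : (2*(m ||| 2^(j+1)) + 1) ^^^ 2^(j+1)
          = 2*((m ||| 2^(j+1)) ^^^ 2^j) + 1 := by
        have h0 : (2*(m ||| 2^(j+1))+1) ^^^ (2*(2^j)+0)
            = 2*((m ||| 2^(j+1)) ^^^ 2^j) + (1 ^^^ 0) :=
          lxor_homog _ _ _ _ (by omega) (by omega)
        have e : (2:Nat)^(j+1) = 2*(2^j)+0 := by omega
        calc (2*(m ||| 2^(j+1)) + 1) ^^^ 2^(j+1)
            = (2*(m ||| 2^(j+1))+1) ^^^ (2*(2^j)+0) := by rw [← e]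
          _ = 2*((m ||| 2^(j+1)) ^^^ 2^j) + 1 := by simpa using h0
      rw [PySem.Int.bor_natCast, PySem.Int.bor_natCast, shr1_cast, shr1_cast, hs1, hs2,
        PySem.Int.bxor_natCast, PySem.Int.bxor_natCast, elor, exor]
      push_cast; ring

-- A's scan on 2*m+1 starting at bit 2 mirrors, step for step, the scan on m starting at bit 1
theorem loop_homog : ∀ (f k m : Nat), m < 2^(k+f) →
    solutionLoop ((2*m+1:Nat):Int) ((2^(k+1):Nat):Int) (f+1)
      = 2 * solutionLoop ((m:Nat):Int) ((2^k:Nat):Int) (f+1)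
        + (if k = 0 ∧ m % 2 = 0 then 0 else 1) := by
  intro f
  induction f with
  | zero =>
      intro k m hm
      exact loop_exit k m 0 (pow_land_zero k m (by simpa using hm))
  | succ f ih =>
      intro k m hm
      by_cases h : 2^k &&& m = 0
      · exact loop_exit k m (f+1) h
      · have hm1 : m % 2 = 1 ∨ k ≠ 0 := by
          by_cases hk : k = 0
          · subst hk
            have := one_land_mod m
            left; simp at h ⊢; omega
          · right; exact hk
        have e1 : (2^(k+1)) &&& (2*m+1) = 2*(2^k &&& m) + (0 &&& 1) := by
          have e : 2^(k+1) = 2*2^k + 0 := by rw [Nat.pow_succ]; ring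
          rw [e]; exact land_homog _ _ _ _ (by omega) (by omega)
        have hne : (2^(k+1)) &&& (2*m+1) ≠ 0 := by
          simp at e1; omega
        have hA : ¬ PySem.Int.band ((2^(k+1):Nat):Int) ((2*m+1:Nat):Int) = 0 := by
          rw [PySem.Int.band_natCast]; exact_mod_cast hne
        have hB : ¬ PySem.Int.band ((2^k:Nat):Int) ((m:Nat):Int) = 0 := by
          rw [PySem.Int.band_natCast]; exact_mod_cast h
        rw [stepA_rec ((2*m+1:Nat):Int) ((2^(k+1):Nat):Int) (f+1) hA]
        rw [stepA_rec ((m:Nat):Int) ((2^k:Nat):Int) (f+1) hB]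
        rw [shl1_cast, shl1_cast]
        have c1 : (2*2^(k+1) : Nat) = 2^(k+1+1) := by rw [Nat.pow_succ]; ring
        have c2 : (2*2^k : Nat) = 2^(k+1) := by rw [Nat.pow_succ]; ring
        rw [c1, c2]
        rw [ih (k+1) m (by
          have e : k + 1 + f = k + (f+1) := by ring
          rw [e]; exact hm)]
        rw [if_neg (by omega), if_neg (by omega)]

-- the two per-number programs agree on every m < 2^F given fuel ≥ F + 2
theorem main_eq : ∀ (F m f : Nat), m < 2^F → F + 2 ≤ f →
    solutionLoop ((m:Nat):Int) (((1:Nat)):Int) f = flipAlt ((m:Nat):Int) f := by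
  intro F
  induction F with
  | zero =>
      intro m f hm hf
      interval_cases m
      obtain ⟨f', rfl⟩ : ∃ f', f = f' + 1 := ⟨f - 1, by omega⟩
      rw [stepA_exit1 _ _ _ (by decide) (by norm_num)]
      rw [flip_even _ _ (by decide)]
      decide
  | succ G ih =>
      intro m f hm hf
      obtain ⟨f', rfl⟩ : ∃ f', f = f' + 1 := ⟨f - 1, by omega⟩
      have h1 : 1 &&& m = m % 2 := one_land_mod m
      by_cases hpar : m % 2 = 0
      · -- even: both return m + 1 immediately
        have hlor : m ||| 1 = m + 1 := by
          obtain ⟨q, rfl⟩ : ∃ q, m = 2*q := ⟨m/2, by omega⟩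
          have h0 : (2*q+0) ||| (2*0+1) = 2*(q ||| 0) + (0 ||| 1) :=
            lor_homog _ _ _ _ (by omega) (by omega)
          simpa using h0
        rw [stepA_exit1 _ _ _ (by
          rw [PySem.Int.band_natCast]
          have : 1 &&& m = 0 := by omega
          exact_mod_cast this) (by norm_num)]
        rw [flip_even _ _ (by
          rw [show (2:Int) = ((2:Nat):Int) by norm_num, PySem.Int.mod_natCast]
          exact_mod_cast hpar)]
        rw [PySem.Int.bor_natCast, hlor]
        push_cast; ring
      · -- odd: one A-step, then loop_homog at k = 0 plus the induction hypothesis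
        obtain ⟨q, rfl⟩ : ∃ q, m = 2*q+1 := ⟨m/2, by omega⟩
        have hq : q < 2^G := by
          have e : 2^(G+1) = 2^G * 2 := Nat.pow_succ ..
          omega
        obtain ⟨f'', rfl⟩ : ∃ f'', f' = f'' + 1 := ⟨f' - 1, by omega⟩
        rw [stepA_rec _ _ _ (by
          rw [PySem.Int.band_natCast]
          have : 1 &&& (2*q+1) ≠ 0 := by omega
          exact_mod_cast this)]
        rw [shl1_cast, show (2*1:Nat) = 2^(0+1) by norm_num]
        rw [loop_homog f'' 0 q (by
          calc q < 2^G := hq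
            _ ≤ 2^(0+f'') := Nat.pow_le_pow_right (by norm_num) (by omega))]
        rw [show ((2^0:Nat):Int) = ((1:Nat):Int) by norm_num]
        rw [ih q (f''+1) hq (by omega)]
        have hodd : ¬ PySem.Int.mod ((2*q+1:Nat):Int) 2 = 0 := by
          rw [show (2:Int) = ((2:Nat):Int) by norm_num, PySem.Int.mod_natCast]
          have e : (2*q+1) % 2 = 1 := by omega
          rw [e]; norm_num
        rw [flip_odd ((2*q+1:Nat):Int) (f''+1) hodd]
        have hfd : PySem.Int.floordiv ((2*q+1:Nat):Int) 2 = ((q:Nat):Int) := by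
          rw [show (2:Int) = ((2:Nat):Int) by norm_num, PySem.Int.floordiv_natCast]
          have : (2*q+1) / 2 = q := by omega
          rw [this]
        rw [hfd]
        rw [show PySem.Int.mod ((q:Nat):Int) 2 = ((q % 2 : Nat):Int) by
          rw [show (2:Int) = ((2:Nat):Int) by norm_num, PySem.Int.mod_natCast]]
        by_cases hqp : q % 2 = 0
        · rw [if_pos ⟨rfl, hqp⟩, hqp]; push_cast; ring
        · rw [if_neg (by omega)]
          have e : q % 2 = 1 := by omega
          rw [e]; push_cast; ring

-- mixed-sign unfoldings of the PySem bitwise primitives (n = -M-1 is Python's ~M)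
theorem band_pos_neg (a M : Nat) : PySem.Int.band ((a:Nat):Int) (-(M:Int)-1) = ((a - (a &&& M) : Nat) : Int) := by
  simp only [PySem.Int.band]
  rw [if_pos (by positivity), if_neg (by omega)]
  rw [show (-(-(M:Int)-1)-1) = (M:Int) by ring, Int.toNat_natCast, Int.toNat_natCast]

theorem bor_neg_pos (M b : Nat) : PySem.Int.bor (-(M:Int)-1) ((b:Nat):Int) = -(((M - (M &&& b)) : Nat) : Int) - 1 := by
  simp only [PySem.Int.bor]
  rw [if_neg (by omega), if_pos (by positivity)]
  rw [show (-(-(M:Int)-1)-1) = (M:Int) by ring, Int.toNat_natCast, Int.toNat_natCast]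

theorem bxor_neg_pos (M b : Nat) : PySem.Int.bxor (-(M:Int)-1) ((b:Nat):Int) = -((M ^^^ b : Nat):Int) - 1 := by
  simp only [PySem.Int.bxor]
  rw [if_neg (by omega), if_pos (by positivity)]
  rw [show (-(-(M:Int)-1)-1) = (M:Int) by ring, Int.toNat_natCast, Int.toNat_natCast]

theorem pow_land_cases (k M : Nat) : 2^k &&& M = 0 ∨ 2^k &&& M = 2^k := by
  by_cases hb : M.testBit k
  · right
    apply Nat.eq_of_testBit_eq
    intro i
    rw [Nat.testBit_and, Nat.testBit_two_pow]
    by_cases hik : k = i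
    · subst hik; simp [hb]
    · simp [hik]
  · left
    apply Nat.eq_of_testBit_eq
    intro i
    rw [Nat.testBit_and, Nat.testBit_two_pow]
    by_cases hik : k = i
    · subst hik; simp [hb]
    · simp [hik]

theorem mod_pow_succ_zero {k M : Nat} (h1 : M % 2^k = 0) (h2 : 2^k &&& M = 0) : M % 2^(k+1) = 0 := by
  have htb : M.testBit k = false := by
    have hz : (2^k &&& M).testBit k = false := by rw [h2]; simp
    rw [Nat.testBit_and, Nat.testBit_two_pow] at hz
    simpa using hz
  have hdm : M / 2^k % 2 = 0 := by
    rw [Nat.testBit_eq_decide_div_mod_eq] at htb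
    simpa using htb
  have hdvd : 2^k ∣ M := Nat.dvd_of_mod_eq_zero h1
  obtain ⟨t, ht⟩ : ∃ t, M / 2^k = 2*t := ⟨M / 2^k / 2, by omega⟩
  have hM : M = 2^(k+1) * t := by
    have h2' := Nat.mul_div_cancel' hdvd
    rw [ht] at h2'
    rw [Nat.pow_succ]
    calc M = 2^k * (2*t) := h2'.symm
      _ = 2^k * 2 * t := by ring
  rw [hM]
  exact Nat.mul_mod_right _ _

-- negative mirror of loop_exit: the scans on -2M'-1 (bit 2^(k+1)) and -M'-1 (bit 2^k) exit together
theorem loop_exit_neg (k M' fl : Nat) (h : 2^k &&& M' = 2^k) :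
    solutionLoop (-((2*M' : Nat):Int)-1) ((2^(k+1):Nat):Int) (fl+1)
      = 2 * solutionLoop (-((M' : Nat):Int)-1) ((2^k:Nat):Int) (fl+1)
        + (if k = 0 ∧ M' % 2 = 1 then 0 else 1) := by
  have hcomm : M' &&& 2^k = 2^k := by rw [Nat.land_comm]; exact h
  have hland2 : (2*M') &&& 2^(k+1) = 2^(k+1) := by
    have h0 : (2*M'+0) &&& (2*(2^k)+0) = 2*(M' &&& 2^k) + (0 &&& 0) :=
      land_homog _ _ _ _ (by omega) (by omega)
    have e : (2:Nat)^(k+1) = 2*(2^k)+0 := by rw [Nat.pow_succ]; ring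
    rw [e]; simpa [hcomm] using h0
  have hband1 : PySem.Int.band ((2^(k+1):Nat):Int) (-((2*M' : Nat):Int)-1) = 0 := by
    rw [band_pos_neg]
    have e : 2^(k+1) - (2^(k+1) &&& (2*M')) = 0 := by
      rw [Nat.land_comm]; omega
    rw [e]; simp
  have hband2 : PySem.Int.band ((2^k:Nat):Int) (-((M' : Nat):Int)-1) = 0 := by
    rw [band_pos_neg]
    have e : 2^k - (2^k &&& M') = 0 := by omega
    rw [e]; simp
  cases k with
  | zero =>
      have hm : M' % 2 = 1 := by
        have := Nat.and_one_is_mod M'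
        have h' : 1 &&& M' = 1 := by simpa using h
        rw [Nat.land_comm] at h'
        omega
      obtain ⟨u, rfl⟩ : ∃ u, M' = 2*u+1 := ⟨M'/2, by omega⟩
      rw [stepA_exit _ _ _ hband1 (by norm_num)]
      rw [stepA_exit1 _ _ _ hband2 (by norm_num)]
      rw [if_pos ⟨rfl, hm⟩]
      have hs : ((2:Nat)^(0+1)) >>> 1 = 1 := by decide
      have hand1 : (2*u+1) &&& 1 = 1 := by
        have := Nat.and_one_is_mod (2*u+1)
        omega
      have hand2 : (2*(2*u+1)) &&& 2^(0+1) = 2 := by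
        have h0 : (2*(2*u+1)+0) &&& (2*1+0) = 2*((2*u+1) &&& 1) + (0 &&& 0) :=
          land_homog _ _ _ _ (by omega) (by omega)
        have e : (2:Nat)^(0+1) = 2*1+0 := by norm_num
        rw [e]; simpa [hand1] using h0
      rw [bor_neg_pos, bor_neg_pos, shr1_cast, hs, bxor_neg_pos]
      rw [show (2^0 : Nat) = 1 by norm_num] at *
      rw [hand2, hand1]
      have e1 : 2*(2*u+1) - 2 = 4*u := by omega
      have e2 : 2*u+1 - 1 = 2*u := by omega
      rw [e1, e2]
      have exor : (4*u) ^^^ 1 = 4*u+1 := by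
        have h0 : (2*(2*u)+0) ^^^ (2*0+1) = 2*((2*u) ^^^ 0) + (0 ^^^ 1) :=
          lxor_homog _ _ _ _ (by omega) (by omega)
        have e : 4*u = 2*(2*u)+0 := by omega
        rw [e]; simp
      rw [exor]
      push_cast; ring
  | succ j =>
      have hle : 2^(j+1) ≤ M' := by
        have := Nat.and_le_right (n := 2^(j+1)) (m := M')
        omega
      obtain ⟨t, rfl⟩ : ∃ t, M' = 2^(j+1) + t := ⟨M' - 2^(j+1), by omega⟩
      have hjj : 2^(j+1) = 2^j * 2 := Nat.pow_succ ..
      have hjjj : 2^(j+1+1) = 2^(j+1) * 2 := Nat.pow_succ ..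
      have hb1 : ((2^(j+1+1):Nat):Int) ≠ 1 := by
        have : (2:Nat)^(j+1+1) ≠ 1 := by have := Nat.two_pow_pos j; omega
        exact_mod_cast this
      have hb2 : ((2^(j+1):Nat):Int) ≠ 1 := by
        have : (2:Nat)^(j+1) ≠ 1 := by have := Nat.two_pow_pos j; omega
        exact_mod_cast this
      rw [stepA_exit _ _ _ hband1 hb1]
      rw [stepA_exit _ _ _ hband2 hb2]
      rw [if_neg (by omega)]
      have hs1 : (2^(j+1+1)) >>> 1 = 2^(j+1) := by
        rw [Nat.shiftRight_succ, Nat.shiftRight_zero]; omega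
      have hs2 : (2^(j+1)) >>> 1 = 2^j := by
        rw [Nat.shiftRight_succ, Nat.shiftRight_zero]; omega
      have hland2' : (2*(2^(j+1)+t)) &&& 2^(j+1+1) = 2^(j+1+1) := hland2
      rw [bor_neg_pos, bor_neg_pos, shr1_cast, shr1_cast, hs1, hs2,
        bxor_neg_pos, bxor_neg_pos]
      rw [hland2', Nat.land_comm (2^(j+1)+t) (2^(j+1))]
      rw [show 2^(j+1) &&& (2^(j+1)+t) = 2^(j+1) from h]
      have e1 : 2*(2^(j+1)+t) - 2^(j+1+1) = 2*t := by omega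
      have e2 : 2^(j+1)+t - 2^(j+1) = t := by omega
      rw [e1, e2]
      have exor : (2*t) ^^^ 2^(j+1) = 2*(t ^^^ 2^j) := by
        have h0 : (2*t+0) ^^^ (2*(2^j)+0) = 2*(t ^^^ 2^j) + (0 ^^^ 0) :=
          lxor_homog _ _ _ _ (by omega) (by omega)
        have e : (2:Nat)^(j+1) = 2*(2^j)+0 := by omega
        rw [e]; simpa using h0
      rw [exor]
      push_cast; ring

-- negative mirror of loop_homog
theorem loop_homog_neg : ∀ (f k M' : Nat), 1 ≤ M' → M' % 2^k = 0 → M' < 2^(k+f) →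
    solutionLoop (-((2*M' : Nat):Int)-1) ((2^(k+1):Nat):Int) (f+1)
      = 2 * solutionLoop (-((M' : Nat):Int)-1) ((2^k:Nat):Int) (f+1)
        + (if k = 0 ∧ M' % 2 = 1 then 0 else 1) := by
  intro f
  induction f with
  | zero =>
      intro k M' h1 hmod hlt
      exfalso
      have := Nat.mod_eq_of_lt (by simpa using hlt : M' < 2^k)
      omega
  | succ f ih =>
      intro k M' h1 hmod hlt
      rcases pow_land_cases k M' with hz | hs
      · -- bit k of M' clear: both scans recurse
        have hmod' : M' % 2^(k+1) = 0 := mod_pow_succ_zero hmod hz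
        have hk2 : M' &&& 2^k = 0 := by rw [Nat.land_comm]; exact hz
        have hland2 : (2*M') &&& 2^(k+1) = 0 := by
          have h0 : (2*M'+0) &&& (2*(2^k)+0) = 2*(M' &&& 2^k) + (0 &&& 0) :=
            land_homog _ _ _ _ (by omega) (by omega)
          have e : (2:Nat)^(k+1) = 2*(2^k)+0 := by rw [Nat.pow_succ]; ring
          rw [e]; simpa [hk2] using h0
        have hpk : 0 < 2^k := Nat.two_pow_pos k
        have hpk1 : 2^(k+1) = 2^k * 2 := Nat.pow_succ ..
        have hA : ¬ PySem.Int.band ((2^(k+1):Nat):Int) (-((2*M' : Nat):Int)-1) = 0 := by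
          rw [band_pos_neg, Nat.land_comm, hland2]
          have : (2:Nat)^(k+1) - 0 = 2^(k+1) := by omega
          rw [this]
          exact_mod_cast (by omega : (2:Nat)^(k+1) ≠ 0)
        have hB : ¬ PySem.Int.band ((2^k:Nat):Int) (-((M' : Nat):Int)-1) = 0 := by
          rw [band_pos_neg, hz]
          have : (2:Nat)^k - 0 = 2^k := by omega
          rw [this]
          exact_mod_cast (by omega : (2:Nat)^k ≠ 0)
        rw [stepA_rec (-((2*M' : Nat):Int)-1) ((2^(k+1):Nat):Int) (f+1) hA]
        rw [stepA_rec (-((M' : Nat):Int)-1) ((2^k:Nat):Int) (f+1) hB]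
        rw [shl1_cast, shl1_cast]
        have c1 : (2*2^(k+1) : Nat) = 2^(k+1+1) := by rw [Nat.pow_succ]; ring
        have c2 : (2*2^k : Nat) = 2^(k+1) := by rw [Nat.pow_succ]; ring
        rw [c1, c2]
        rw [ih (k+1) M' h1 hmod' (by
          have e : k + 1 + f = k + (f+1) := by ring
          rw [e]; exact hlt)]
        have hpar : M' % 2 = 0 ∨ k ≠ 0 := by
          by_cases hk : k = 0
          · left
            subst hk
            have := Nat.and_one_is_mod M'
            rw [Nat.land_comm] at hk2
            omega
          · right; exact hk
        rw [if_neg (by omega), if_neg (by omega)]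
      · exact loop_exit_neg k M' (f+1) hs

-- negative mirror of main_eq: agreement on n = -M-1 for every 1 ≤ M < 2^F given fuel ≥ F + 2
theorem main_eq_neg : ∀ (F M f : Nat), 1 ≤ M → M < 2^F → F + 2 ≤ f →
    solutionLoop (-((M:Nat):Int)-1) (((1:Nat)):Int) f = flipAlt (-((M:Nat):Int)-1) f := by
  intro F
  induction F with
  | zero =>
      intro M f hM hlt hf
      simp at hlt
      omega
  | succ G ih =>
      intro M f hM hlt hf
      obtain ⟨f', rfl⟩ : ∃ f', f = f' + 1 := ⟨f - 1, by omega⟩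
      have hq := PySem.Int.floordiv_mul_add_mod (-((M:Nat):Int)-1) 2
      have hr0 : 0 ≤ PySem.Int.mod (-((M:Nat):Int)-1) 2 := PySem.Int.mod_nonneg _ (by norm_num)
      have hr1 : PySem.Int.mod (-((M:Nat):Int)-1) 2 < 2 := PySem.Int.mod_lt _ (by norm_num)
      by_cases hpar : M % 2 = 1
      · -- M odd, n even: both return n + 1
        obtain ⟨u, rfl⟩ : ∃ u, M = 2*u+1 := ⟨M/2, by omega⟩
        have hband : PySem.Int.band (((1:Nat)):Int) (-((2*u+1:Nat):Int)-1) = 0 := by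
          rw [band_pos_neg]
          have h1 : (1:Nat) &&& (2*u+1) = 1 := by
            rw [Nat.land_comm]
            have := Nat.and_one_is_mod (2*u+1)
            omega
          rw [h1]; simp
        rw [stepA_exit1 _ _ _ hband (by norm_num)]
        rw [flip_even _ _ (by omega)]
        rw [bor_neg_pos]
        have h2 : (2*u+1) &&& 1 = 1 := by
          have := Nat.and_one_is_mod (2*u+1)
          omega
        rw [h2]
        have e : 2*u+1-1 = 2*u := by omega
        rw [e]
        push_cast; ring
      · -- M even, n odd: one A-step, then the negative homog lemma and the induction hypothesis
        obtain ⟨q, rfl⟩ : ∃ q, M = 2*q := ⟨M/2, by omega⟩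
        have hq1 : 1 ≤ q := by omega
        have hqlt : q < 2^G := by
          have e : 2^(G+1) = 2^G * 2 := Nat.pow_succ ..
          omega
        obtain ⟨f'', rfl⟩ : ∃ f'', f' = f'' + 1 := ⟨f' - 1, by omega⟩
        have hband : ¬ PySem.Int.band (((1:Nat)):Int) (-((2*q:Nat):Int)-1) = 0 := by
          rw [band_pos_neg]
          have h1 : (1:Nat) &&& (2*q) = 0 := by
            rw [Nat.land_comm]
            have := Nat.and_one_is_mod (2*q)
            omega
          rw [h1]; norm_num
        rw [stepA_rec _ _ _ hband]
        rw [shl1_cast, show (2*1:Nat) = 2^(0+1) by norm_num]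
        rw [loop_homog_neg f'' 0 q hq1 (by simpa using Nat.mod_one q) (by
          calc q < 2^G := hqlt
            _ ≤ 2^(0+f'') := Nat.pow_le_pow_right (by norm_num) (by omega))]
        rw [show ((2^0:Nat):Int) = ((1:Nat):Int) by norm_num]
        rw [ih q (f''+1) hq1 hqlt (by omega)]
        have hodd : ¬ PySem.Int.mod (-((2*q:Nat):Int)-1) 2 = 0 := by omega
        rw [flip_odd (-((2*q:Nat):Int)-1) (f''+1) hodd]
        have hfd : PySem.Int.floordiv (-((2*q:Nat):Int)-1) 2 = -((q:Nat):Int)-1 := by omega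
        rw [hfd]
        have hq2 := PySem.Int.floordiv_mul_add_mod (-((q:Nat):Int)-1) 2
        have hr2 : 0 ≤ PySem.Int.mod (-((q:Nat):Int)-1) 2 := PySem.Int.mod_nonneg _ (by norm_num)
        have hr3 : PySem.Int.mod (-((q:Nat):Int)-1) 2 < 2 := PySem.Int.mod_lt _ (by norm_num)
        by_cases hqp : q % 2 = 1
        · rw [if_pos ⟨rfl, hqp⟩]
          have e : PySem.Int.mod (-((q:Nat):Int)-1) 2 = 0 := by omega
          rw [e]
        · rw [if_neg (by omega)]
          have e : PySem.Int.mod (-((q:Nat):Int)-1) 2 = 1 := by omega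
          rw [e]

-- pointwise agreement on the admitted domain
theorem flip_eq (n : Int) (hne : n ≠ -1) (hlo : -2147483648 ≤ n) (hdom : n ≤ 2147483648) :
    solutionLoop n 1 64 = flipAlt n 64 := by
  have h33 : (2:Nat)^33 = 8589934592 := by norm_num
  by_cases h0 : 0 ≤ n
  · have hn : n = ((n.toNat : Nat) : Int) := by omega
    rw [hn, show (1:Int) = ((1:Nat):Int) from rfl]
    apply main_eq 33
    · omega
    · omega
  · have hn : n = -(((-n-1).toNat : Nat) : Int) - 1 := by omega
    rw [hn, show (1:Int) = ((1:Nat):Int) from rfl]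
    apply main_eq_neg 33
    · omega
    · omega
    · omega

-- ===== VERDICT (by name: the statement is the Claim_ definition above) =====
theorem solution_spec : Claim_equal_solution := by
  intro numbers hdom hpre
  unfold Spec_solution solution solution_alt
  rw [PySem.List.foldl_append_singleton_eq_map]
  apply List.map_congr_left
  intro n hn
  have h0 := hpre n hn
  have hd : pvDomInt n = true := by
    have := (List.all_eq_true.mp hdom) n hn
    simpa using this
  have hdn : -2147483648 ≤ n ∧ n ≤ 2147483648 := by
    simp only [pvDomInt, decide_eq_true_eq] at hd
    exact hd
  exact flip_eq n h0 hdn.1 hdn.2
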